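-- pv_equiv track=rewrite | github.com/BeatrisIlieva/drf-react-gems | server/src/products/managers2.py | _filter_white_diamonds_per_product
-- ===== SOURCE A (Python) =====
-- def _filter_white_diamonds_per_product(stones):
--     from collections import defaultdict
--
--     stones_by_product = defaultdict(list)
--     for stone in stones:
--         stones_by_product[stone['product_id']].append(stone)
--
--     filtered_stones = []
--     for product_id, product_stones in stones_by_product.items():
--         only_white_diamond = all(
--             s['stone'] == 'Diamond' and s['color'] == 'White'
--             for s in product_stones
--         )
--         if not only_white_diamond:
--             product_stones = [
--                 s for s in product_stones
--                 if not (s['stone'] == 'Diamond' and s['color'] == 'White')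
--             ]
--         filtered_stones.extend(product_stones)
--
--     return filtered_stones
-- ===== SOURCE B (Python) =====
-- def _filter_white_diamonds_per_product(stones):
--     # One pass over the stones: group and partition simultaneously into
--     # (white_diamonds, others) per product, then decide per group.
--     groups = {}  # product_id -> (white_diamonds, others), insertion order
--     for s in stones:
--         pid = s['product_id']
--         if pid not in groups:
--             groups[pid] = ([], [])
--         whites, others = groups[pid]
--         if s['stone'] == 'Diamond' and s['color'] == 'White':
--             whites.append(s)
--         else:
--             others.append(s)
--     result = []
--     for whites, others in groups.values():
--         result.extend(whites if not others else others)
--     return result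
-- ===== Notes on version B (the rewrite author's own statement) =====
-- stated objective: alternative
-- what changed: Instead of grouping stones and then per group running an all()-scan plus a conditional second filtering pass, B partitions each product's stones into (white_diamonds, others) during the single grouping pass and afterwards emits the whole group iff 'others' is empty, else only 'others'.
import Mathlib
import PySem

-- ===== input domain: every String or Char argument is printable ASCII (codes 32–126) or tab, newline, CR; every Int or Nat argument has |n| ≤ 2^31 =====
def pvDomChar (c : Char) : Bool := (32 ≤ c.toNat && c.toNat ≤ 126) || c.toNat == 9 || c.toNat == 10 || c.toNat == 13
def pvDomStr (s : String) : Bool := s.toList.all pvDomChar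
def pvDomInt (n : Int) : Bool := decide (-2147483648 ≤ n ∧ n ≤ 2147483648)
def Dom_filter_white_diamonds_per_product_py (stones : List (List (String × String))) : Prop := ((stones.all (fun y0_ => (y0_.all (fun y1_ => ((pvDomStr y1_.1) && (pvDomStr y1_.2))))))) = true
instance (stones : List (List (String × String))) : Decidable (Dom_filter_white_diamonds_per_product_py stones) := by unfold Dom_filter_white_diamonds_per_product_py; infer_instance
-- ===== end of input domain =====

-- B replaces A's per-group all()-scan plus conditional re-filter by partitioning each
-- product's stones into (whites, others) during the single grouping pass (alternative decomposition).

-- s[k] for a stone dict s (total form; Pre_ guarantees the key is present where Python reads it)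
def pvSGet (s : List (String × String)) (k : String) : String := (PySem.Dict.mk s).getD k ""

-- s['stone'] == 'Diamond' and s['color'] == 'White'  (the predicate both Pythons spell out)
def pvIsWhiteDiamond (s : List (String × String)) : Bool :=
  pvSGet s "stone" == "Diamond" && pvSGet s "color" == "White"

-- ===== PORT A =====
-- stones_by_product = defaultdict(list); for stone in stones: stones_by_product[stone['product_id']].append(stone)
def pvGroupA (stones : List (List (String × String))) : PySem.Dict String (List (List (String × String))) :=
  stones.foldl (fun d s => d.modify (pvSGet s "product_id") [] (fun g => g ++ [s])) PySem.Dict.empty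

def filter_white_diamonds_per_product_py (stones : List (List (String × String))) : List (List (String × String)) :=
  (pvGroupA stones).items.foldl (fun acc p =>
    let product_stones := p.2
    let only_white_diamond := product_stones.all pvIsWhiteDiamond
    let product_stones :=
      if !only_white_diamond then product_stones.filter (fun s => !(pvIsWhiteDiamond s))
      else product_stones
    acc ++ product_stones) []

-- ===== PORT B =====
-- groups[pid] = (whites, others), built in one pass; appends go to whites or others directly
def pvGroupB (stones : List (List (String × String))) :
    PySem.Dict String (List (List (String × String)) × List (List (String × String))) :=
  stones.foldl (fun d s =>
    d.insert (pvSGet s "product_id")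
      (let wo := d.getD (pvSGet s "product_id") ([], [])
       if pvIsWhiteDiamond s then (wo.1 ++ [s], wo.2) else (wo.1, wo.2 ++ [s])))
    PySem.Dict.empty

def filter_white_diamonds_per_product_py_alt (stones : List (List (String × String))) : List (List (String × String)) :=
  (pvGroupB stones).values.foldl (fun acc wo =>
    acc ++ (if wo.2.isEmpty then wo.1 else wo.2)) []

-- ===== PRECONDITION & SPEC =====
-- Pre_ excludes exactly the inputs where Python A raises KeyError: a stone without a
-- 'product_id' or 'stone' key, or a Diamond stone without a 'color' key.
def Pre_filter_white_diamonds_per_product_py (stones : List (List (String × String))) : Prop :=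
  (stones.all (fun s =>
    (PySem.Dict.mk s).contains "product_id" &&
    (PySem.Dict.mk s).contains "stone" &&
    (!((PySem.Dict.mk s).getD "stone" "" == "Diamond") || (PySem.Dict.mk s).contains "color"))) = true
instance (stones : List (List (String × String))) : Decidable (Pre_filter_white_diamonds_per_product_py stones) := by unfold Pre_filter_white_diamonds_per_product_py; infer_instance

def pvWitness_filter_white_diamonds_per_product_py : (List (List (String × String))) :=
  [[("product_id", "1"), ("stone", "Diamond"), ("color", "White")],
   [("product_id", "1"), ("stone", "Ruby"), ("color", "Red")],
   [("product_id", "2"), ("stone", "Diamond"), ("color", "White")]]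

def Spec_filter_white_diamonds_per_product_py (stones : List (List (String × String))) (out : List (List (String × String))) : Prop := out = filter_white_diamonds_per_product_py_alt stones
instance (stones : List (List (String × String))) (out : List (List (String × String))) : Decidable (Spec_filter_white_diamonds_per_product_py stones out) := by unfold Spec_filter_white_diamonds_per_product_py; infer_instance

-- ===== CLAIM (what is proved, stated in full; the proofs are below) =====
def Claim_equal_filter_white_diamonds_per_product_py : Prop := ∀ (stones : List (List (String × String))), Dom_filter_white_diamonds_per_product_py stones → Pre_filter_white_diamonds_per_product_py stones → Spec_filter_white_diamonds_per_product_py stones (filter_white_diamonds_per_product_py stones)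

-- ===== LEMMAS AND PROOFS =====

-- abbreviation for the group of product c (in A's order of first appearance)
def pvGrp (stones : List (List (String × String))) (c : String) : List (List (String × String)) :=
  stones.filter (fun s => pvSGet s "product_id" == c)

lemma pvMapFilter (stones : List (List (String × String))) (c : String) :
    ((stones.map (fun s => (pvSGet s "product_id", s))).filter (fun p => p.1 == c)).map (fun p => p.2) =
    pvGrp stones c := by
  unfold pvGrp
  induction stones with
  | nil => simp
  | cons s t ih => by_cases h : pvSGet s "product_id" == c <;> simp [h, ih]

lemma pvGroupA_getD (stones : List (List (String × String))) (c : String) :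
    (pvGroupA stones).getD c [] = pvGrp stones c := by
  unfold pvGroupA
  have h := PySem.Dict.getD_foldl_modify_append
    (l := stones.map (fun s => (pvSGet s "product_id", s))) (d := PySem.Dict.empty) (c := c)
  simp only [List.foldl_map] at h
  rw [h, pvMapFilter]
  simp

lemma pvGroupB_getD (stones : List (List (String × String))) (c : String)
    (d : PySem.Dict String (List (List (String × String)) × List (List (String × String)))) :
    (stones.foldl (fun d s =>
      d.insert (pvSGet s "product_id")
        (let wo := d.getD (pvSGet s "product_id") ([], [])
         if pvIsWhiteDiamond s then (wo.1 ++ [s], wo.2) else (wo.1, wo.2 ++ [s]))) d).getD c ([], []) =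
    ((d.getD c ([], [])).1 ++ (pvGrp stones c).filter pvIsWhiteDiamond,
     (d.getD c ([], [])).2 ++ (pvGrp stones c).filter (fun s => !(pvIsWhiteDiamond s))) := by
  induction stones generalizing d with
  | nil => simp [pvGrp]
  | cons s t ih =>
    simp only [List.foldl_cons, ih]
    rw [PySem.Dict.getD_insert]
    by_cases hc : c = pvSGet s "product_id"
    · cases hw : pvIsWhiteDiamond s
      · simp [pvGrp, hc, hw]
      · simp [pvGrp, hc, hw]
    · have hne : ¬ (pvSGet s "product_id" == c) = true := by
        simp; exact fun h => hc h.symm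
      simp [pvGrp, hc, hne]

lemma pvKeys_eq (stones : List (List (String × String))) :
    (pvGroupB stones).keys = (pvGroupA stones).keys := by
  unfold pvGroupA pvGroupB
  rw [PySem.Dict.keys_foldl_modify_key (key := fun s => pvSGet s "product_id")]
  rw [PySem.Dict.keys_foldl_insert_key (key := fun s => pvSGet s "product_id")]
  rfl

lemma pvNodupA (stones : List (List (String × String))) : (pvGroupA stones).keys.Nodup := by
  unfold pvGroupA
  apply PySem.Dict.nodup_keys_foldl_modify_key
  decide

lemma pvNodupB (stones : List (List (String × String))) : (pvGroupB stones).keys.Nodup := by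
  rw [pvKeys_eq]; exact pvNodupA stones

-- the per-group branch equality: A's all()-then-refilter equals B's partition-then-decide
lemma pvBranch_eq (g : List (List (String × String))) :
    (if !(g.all pvIsWhiteDiamond) then g.filter (fun s => !(pvIsWhiteDiamond s)) else g) =
    (if (g.filter (fun s => !(pvIsWhiteDiamond s))).isEmpty
     then g.filter pvIsWhiteDiamond else g.filter (fun s => !(pvIsWhiteDiamond s))) := by
  by_cases h : g.all pvIsWhiteDiamond
  · have h1 : g.filter (fun s => !(pvIsWhiteDiamond s)) = [] := by
      rw [List.filter_eq_nil_iff]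
      intro a ha
      simp [List.all_eq_true.mp h a ha]
    have h2 : g.filter pvIsWhiteDiamond = g := by
      rw [List.filter_eq_self]
      exact List.all_eq_true.mp h
    simp [h, h1, h2]
  · have h1 : ¬ (g.filter (fun s => !(pvIsWhiteDiamond s))).isEmpty = true := by
      simp only [List.all_eq_true] at h
      push Not at h
      obtain ⟨a, ha, hna⟩ := h
      simp only [List.isEmpty_iff, List.filter_eq_nil_iff]
      intro hall
      exact (hall a ha) (by simp [hna])
    simp [h, h1]

-- ===== VERDICT (by name: the statement is the Claim_ definition above) =====
theorem filter_white_diamonds_per_product_py_spec : Claim_equal_filter_white_diamonds_per_product_py := by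
  intro stones _ _
  unfold Spec_filter_white_diamonds_per_product_py
  unfold filter_white_diamonds_per_product_py filter_white_diamonds_per_product_py_alt
  rw [PySem.Dict.values_eq_map_keys _ (pvNodupB stones) ([], []),
      PySem.Dict.items_eq_map_keys _ (pvNodupA stones) [],
      pvKeys_eq]
  rw [PySem.List.foldl_append_eq_flatMap, PySem.List.foldl_append_eq_flatMap]
  simp only [List.flatMap_map]
  refine congrArg (fun f => List.flatMap f (pvGroupA stones).keys) (funext fun c => ?_)
  rw [pvGroupA_getD]
  have hB := pvGroupB_getD stones c PySem.Dict.empty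
  unfold pvGroupB
  rw [hB]
  simp only [PySem.Dict.getD_empty, List.nil_append]
  exact pvBranch_eq (pvGrp stones c)
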